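-- pv_equiv track=rewrite | github.com/nzin4x/codetest | test/tests_5525.py | make_group_result
-- ===== SOURCE A (Python) =====
-- def make_group_result(in_str):
--     group_set = list()
--     if len(in_str) < 3:
--         pass
--     else:
--         continuing = 0
--         current_group_start = 0
--         is_open = False
--         for i, v in enumerate(in_str):
--             if not is_open:
--                 # 새로운 시작을 찾는 로직
--                 if v == 'I':
--                     is_open = True
--                     current_group_start = i
--                     continuing = 1
--             else:
--                 if in_str[i - 1] != v:
--                     continuing = continuing + 1
--                 else:
--                     if continuing > 2:
--                         group_set.append((current_group_start, even2odd(continuing)))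
--                         continuing = 0
--
--                     if v == 'I':
--                         current_group_start = i
--                         continuing = 1
--
--                     if v != 'I':
--                         is_open = False
--                         continuing = 0
--
--                 if len(in_str) == i + 1:  # 그냥 끝
--                     if continuing > 2:
--                         group_set.append((current_group_start, even2odd(continuing)))
--                         continuing = 0
--
--     return group_set
--
-- def even2odd(maybeeven):
--     if 0 == maybeeven % 2:
--         return maybeeven - 1
--
--     return maybeeven
-- ===== SOURCE B (Python) =====
-- # B: segment the string into maximal alternating runs, then anchor each group at
-- # the run's first 'I' -- replaces A's is_open/continuing state machine.
--
-- def even2odd(maybeeven):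
--     if 0 == maybeeven % 2:
--         return maybeeven - 1
--     return maybeeven
--
--
-- def make_group_result(in_str):
--     if len(in_str) < 3:
--         return []
--     res = []
--     n = len(in_str)
--     i = 0
--     while i < n:
--         # find the end k of the maximal alternating run starting at i
--         k = i + 1
--         while k < n and in_str[k] != in_str[k - 1]:
--             k += 1
--         # first 'I' inside the run anchors the group
--         j = in_str.find('I', i, k)
--         if j != -1 and k - j > 2:
--             res.append((j, even2odd(k - j)))
--         i = k
--     return res
-- ===== Notes on version B (the rewrite author's own statement) =====
-- stated objective: alternative
-- what changed: Replaces A's single-pass is_open/continuing state machine by an explicit decomposition: segment the string into maximal alternating runs, then anchor each reported group at the first letter-I position inside its run and measure the length from there to the run's end.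
import Mathlib
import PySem

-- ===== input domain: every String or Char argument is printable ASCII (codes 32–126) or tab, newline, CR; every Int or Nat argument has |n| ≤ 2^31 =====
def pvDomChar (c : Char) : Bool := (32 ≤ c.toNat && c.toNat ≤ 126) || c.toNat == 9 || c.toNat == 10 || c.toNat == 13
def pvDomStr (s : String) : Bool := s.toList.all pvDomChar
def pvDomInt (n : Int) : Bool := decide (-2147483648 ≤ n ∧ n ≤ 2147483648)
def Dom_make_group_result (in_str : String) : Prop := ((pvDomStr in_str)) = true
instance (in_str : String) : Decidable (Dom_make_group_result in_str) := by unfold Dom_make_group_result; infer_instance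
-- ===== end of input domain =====

-- B replaces A's is_open/continuing state machine by an explicit segmentation into
-- maximal alternating runs, anchoring each group at the run's first 'I' (objective: alternative decomposition, same cost).

-- ===== PORT A =====
def even2odd (maybeeven : Int) : Int :=
  if (0 : Int) = PySem.Int.mod maybeeven 2 then maybeeven - 1 else maybeeven

-- A's loop body (the for-loop of make_group_result), state = (group_set, continuing, current_group_start, is_open)
def stepA (l : List Char) (st : List (Int × Int) × Int × Int × Bool) (iv : Int × Char) :
    List (Int × Int) × Int × Int × Bool :=
  let group_set := st.1
  let continuing := st.2.1
  let current_group_start := st.2.2.1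
  let is_open := st.2.2.2
  let i := iv.1
  let v := iv.2
  if is_open = false then
    -- looking for a new start
    if v = 'I' then (group_set, 1, i, true) else st
  else
    let st2 :=
      if (PySem.List.pyGet? l (i - 1)).getD ' ' ≠ v then
        (group_set, continuing + 1, current_group_start, is_open)
      else
        let p1 := if continuing > 2 then
            (group_set ++ [(current_group_start, even2odd continuing)], (0 : Int))
          else (group_set, continuing)
        let p2 := if v = 'I' then (i, (1 : Int)) else (current_group_start, p1.2)
        if v ≠ 'I' then (p1.1, (0 : Int), p2.1, false) else (p1.1, p2.2, p2.1, is_open)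
    -- "그냥 끝": flush at the last index
    if (l.length : Int) = i + 1 then
      if st2.2.1 > 2 then (st2.1 ++ [(st2.2.2.1, even2odd st2.2.1)], 0, st2.2.2.1, st2.2.2.2)
      else st2
    else st2

def make_group_result (in_str : String) : List (Int × Int) :=
  let l := in_str.toList
  if l.length < 3 then []
  else ((PySem.List.enumerate l).foldl (stepA l) ([], 0, 0, false)).1

-- ===== PORT B =====
-- inner while: the maximal alternating continuation of the run after previous char p
def splitRun : Char → List Char → List Char × List Char
  | _, [] => ([], [])
  | p, c :: rest =>
    if c = p then ([], c :: rest)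
    else
      let pr := splitRun c rest
      (c :: pr.1, pr.2)

lemma splitRun_snd_length (p : Char) (l : List Char) : (splitRun p l).2.length ≤ l.length := by
  induction l generalizing p with
  | nil => simp [splitRun]
  | cons c rest ih =>
    simp only [splitRun]
    split_ifs with h
    · simp
    · exact le_trans (ih c) (Nat.le_succ _)

-- outer while: one iteration per maximal alternating run
def procRuns : Int → List Char → List (Int × Int)
  | _, [] => []
  | i, c :: rest =>
    let pr := splitRun c rest
    let run := c :: pr.1
    let res :=
      match List.idxOf? 'I' run with
      | none => []
      | some t =>
        let len : Int := (run.length : Int) - (t : Int)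
        if len > 2 then [(i + (t : Int), even2odd len)] else []
    res ++ procRuns (i + (run.length : Int)) pr.2
termination_by _ l => l.length
decreasing_by simpa using Nat.lt_succ_of_le (splitRun_snd_length c rest)

def make_group_result_alt (in_str : String) : List (Int × Int) :=
  let l := in_str.toList
  if l.length < 3 then [] else procRuns 0 l

-- ===== PRECONDITION & SPEC =====
def Spec_make_group_result (in_str : String) (out : List (Int × Int)) : Prop := out = make_group_result_alt in_str
instance (in_str : String) (out : List (Int × Int)) : Decidable (Spec_make_group_result in_str out) := by unfold Spec_make_group_result; infer_instance

-- ===== CLAIM (what is proved, stated in full; the proofs are below) =====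
def Claim_equal_make_group_result : Prop := ∀ (in_str : String), Dom_make_group_result in_str → Spec_make_group_result in_str (make_group_result in_str)

-- ===== LEMMAS AND PROOFS =====

-- A's loop, rewritten as structural recursion carrying the previous character p and the index i
def stepAp (n : Int) (p : Char) (i : Int) (st : List (Int × Int) × Int × Int × Bool) (v : Char) :
    List (Int × Int) × Int × Int × Bool :=
  let group_set := st.1
  let continuing := st.2.1
  let current_group_start := st.2.2.1
  let is_open := st.2.2.2
  if is_open = false then
    if v = 'I' then (group_set, 1, i, true) else st
  else
    let st2 :=
      if p ≠ v then (group_set, continuing + 1, current_group_start, is_open)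
      else
        let p1 := if continuing > 2 then
            (group_set ++ [(current_group_start, even2odd continuing)], (0 : Int))
          else (group_set, continuing)
        let p2 := if v = 'I' then (i, (1 : Int)) else (current_group_start, p1.2)
        if v ≠ 'I' then (p1.1, (0 : Int), p2.1, false) else (p1.1, p2.2, p2.1, is_open)
    if n = i + 1 then
      if st2.2.1 > 2 then (st2.1 ++ [(st2.2.2.1, even2odd st2.2.1)], 0, st2.2.2.1, st2.2.2.2)
      else st2
    else st2

def recAcore (n : Int) : Char → Int → (List (Int × Int) × Int × Int × Bool) → List Char →
    List (Int × Int) × Int × Int × Bool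
  | _, _, st, [] => st
  | p, i, st, v :: rest => recAcore n v (i + 1) (stepAp n p i st v) rest

lemma recAcore_nil (n : Int) (p : Char) (i : Int) (st : List (Int × Int) × Int × Int × Bool) :
    recAcore n p i st [] = st := rfl

lemma recAcore_cons (n : Int) (p : Char) (i : Int) (st : List (Int × Int) × Int × Int × Bool)
    (v : Char) (rest : List Char) :
    recAcore n p i st (v :: rest) = recAcore n v (i + 1) (stepAp n p i st v) rest := rfl

lemma pyGet_prev (pre rest : List Char) (h : pre ≠ []) :
    PySem.List.pyGet? (pre ++ rest) ((pre.length : Int) - 1) = some (pre.getLast h) := by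
  have h0 : (0 : Int) ≤ (pre.length : Int) - 1 := by
    have : 0 < pre.length := List.length_pos_iff.mpr h
    omega
  rw [PySem.List.pyGet?_of_nonneg _ h0]
  have ht : ((pre.length : Int) - 1).toNat = pre.length - 1 := by omega
  rw [ht]
  have hlt : pre.length - 1 < pre.length := by
    have : 0 < pre.length := List.length_pos_iff.mpr h
    omega
  rw [List.getElem?_append_left hlt, List.getElem?_eq_getElem hlt]
  simp [List.getLast_eq_getElem]

lemma stepA_eq_stepAp (l pre rest : List Char) (h : pre ≠ []) (hl : l = pre ++ rest)
    (st : List (Int × Int) × Int × Int × Bool) (v : Char) :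
    stepA l st ((pre.length : Int), v) = stepAp (l.length : Int) (pre.getLast h) (pre.length : Int) st v := by
  subst hl
  simp only [stepA, stepAp, pyGet_prev pre rest h, Option.getD_some]

lemma bridge (l : List Char) : ∀ (rest pre : List Char) (st : List (Int × Int) × Int × Int × Bool)
    (h : pre ≠ []), l = pre ++ rest →
    List.foldl (stepA l) st (PySem.List.enumerate rest ((pre.length : Int))) =
      recAcore (l.length : Int) (pre.getLast h) (pre.length : Int) st rest := by
  intro rest
  induction rest with
  | nil => intro pre st h _; simp [PySem.List.enumerate, recAcore]
  | cons v rest' ih =>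
    intro pre st h hl
    rw [PySem.List.enumerate_cons, List.foldl_cons, stepA_eq_stepAp l pre (v :: rest') h hl]
    have h' : pre ++ [v] ≠ [] := by simp
    have hl' : l = (pre ++ [v]) ++ rest' := by simp [hl]
    have := ih (pre ++ [v]) (stepAp (l.length : Int) (pre.getLast h) (pre.length : Int) st v) h' hl'
    rw [List.getLast_concat] at this
    rw [recAcore]
    have e2 : (((pre ++ [v]).length : Nat) : Int) = (pre.length : Int) + 1 := by simp
    rw [e2] at this
    exact this

-- B-side views of A's two loop states
def Bclosed (i : Int) (p : Char) (l : List Char) : List (Int × Int) :=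
  let pr := splitRun p l
  (match List.idxOf? 'I' pr.1 with
   | none => []
   | some t =>
     let len : Int := (pr.1.length : Int) - (t : Int)
     if len > 2 then [(i + (t : Int), even2odd len)] else []) ++
  procRuns (i + (pr.1.length : Int)) pr.2

def Bopen (j cont i : Int) (p : Char) (l : List Char) : List (Int × Int) :=
  let pr := splitRun p l
  let total := cont + (pr.1.length : Int)
  (if total > 2 then [(j, even2odd total)] else []) ++ procRuns (i + (pr.1.length : Int)) pr.2

lemma procRuns_cons_I (i : Int) (rest : List Char) :
    procRuns i ('I' :: rest) = Bopen i 1 (i + 1) 'I' rest := by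
  rw [procRuns]
  simp only [Bopen, List.idxOf?_cons, beq_self_eq_true, if_true, List.length_cons]
  push_cast
  ring_nf

lemma procRuns_cons_nonI (i : Int) (c : Char) (hc : c ≠ 'I') (rest : List Char) :
    procRuns i (c :: rest) = Bclosed (i + 1) c rest := by
  rw [procRuns]
  simp only [Bclosed, List.idxOf?_cons, beq_iff_eq, if_neg hc, List.length_cons]
  cases hfind : List.idxOf? 'I' (splitRun c rest).1 with
  | none => simp only [Option.map_none]; push_cast; ring_nf
  | some t =>
    simp only [Option.map_some]
    push_cast
    ring_nf

lemma Bclosed_step_nonI (i : Int) (p v : Char) (hvp : v ≠ p) (hv : v ≠ 'I') (rest : List Char) :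
    Bclosed i p (v :: rest) = Bclosed (i + 1) v rest := by
  simp only [Bclosed, splitRun, if_neg hvp, List.idxOf?_cons, beq_iff_eq,
    if_neg hv, List.length_cons]
  cases hfind : List.idxOf? 'I' (splitRun v rest).1 with
  | none => simp only [Option.map_none]; push_cast; ring_nf
  | some t =>
    simp only [Option.map_some]
    push_cast
    ring_nf

lemma Bclosed_step_I (i : Int) (p : Char) (hp : 'I' ≠ p) (rest : List Char) :
    Bclosed i p ('I' :: rest) = Bopen i 1 (i + 1) 'I' rest := by
  simp only [Bclosed, Bopen, splitRun, if_neg hp, List.idxOf?_cons, beq_self_eq_true,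
    if_true, List.length_cons]
  push_cast
  ring_nf

lemma Bopen_step (j cont i : Int) (p v : Char) (hvp : v ≠ p) (rest : List Char) :
    Bopen j cont i p (v :: rest) = Bopen j (cont + 1) (i + 1) v rest := by
  simp only [Bopen, splitRun, if_neg hvp, List.length_cons]
  push_cast
  ring_nf

-- the main invariant: A's recursion from either loop state computes B's run-based result
lemma main_inv : ∀ (N : Nat) (l : List Char), l.length ≤ N → ∀ (n i : Int), n = i + (l.length : Int) →
    ((∀ (p : Char) (acc : List (Int × Int)) (cont start : Int), p ≠ 'I' →
        (recAcore n p i (acc, cont, start, false) l).1 = acc ++ Bclosed i p l) ∧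
     (∀ (p : Char) (acc : List (Int × Int)) (cont j : Int), 1 ≤ cont → (cont ≤ 2 ∨ l ≠ []) →
        (recAcore n p i (acc, cont, j, true) l).1 = acc ++ Bopen j cont i p l)) := by
  intro N
  induction N with
  | zero =>
    intro l hlen n i hn
    have hl : l = [] := List.eq_nil_of_length_eq_zero (Nat.le_zero.mp hlen)
    subst hl
    refine ⟨fun p acc cont start hp => ?_, fun p acc cont j hc hside => ?_⟩
    · simp [recAcore, Bclosed, splitRun, procRuns]
    · have hc2 : cont ≤ 2 := hside.resolve_right (by simp)
      simp [recAcore, Bopen, splitRun, procRuns, show ¬ ((2:Int) < cont) by omega]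
  | succ N ih =>
    intro l hlen n i hn
    cases l with
    | nil =>
      refine ⟨fun p acc cont start hp => ?_, fun p acc cont j hc hside => ?_⟩
      · simp [recAcore, Bclosed, splitRun, procRuns]
      · have hc2 : cont ≤ 2 := hside.resolve_right (by simp)
        simp [recAcore, Bopen, splitRun, procRuns, show ¬ ((2:Int) < cont) by omega]
    | cons v rest =>
      have hlen' : rest.length ≤ N := by simpa using hlen
      have hn' : n = (i + 1) + (rest.length : Int) := by
        simp only [List.length_cons] at hn; push_cast at hn ⊢; omega
      obtain ⟨IHc, IHo⟩ := ih rest hlen' n (i + 1) hn'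
      constructor
      · -- closed state
        intro p acc cont start hp
        by_cases hv : v = 'I'
        · subst hv
          have hvp : ('I' : Char) ≠ p := fun h => hp h.symm
          have hstep : stepAp n p i (acc, cont, start, false) 'I' = (acc, 1, i, true) := by
            simp [stepAp]
          rw [recAcore_cons, hstep]
          rw [IHo 'I' acc 1 i (by norm_num) (Or.inl (by norm_num))]
          rw [Bclosed_step_I i p hvp rest]
        · have hstep : stepAp n p i (acc, cont, start, false) v = (acc, cont, start, false) := by
            simp [stepAp, hv]
          rw [recAcore_cons, hstep]
          rw [IHc v acc cont start hv]
          by_cases hvp : v = p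
          · subst hvp
            have hB : Bclosed i v (v :: rest) = procRuns i (v :: rest) := by
              simp [Bclosed, splitRun, List.idxOf?]
            rw [hB, procRuns_cons_nonI i v hv rest]
          · rw [Bclosed_step_nonI i p v hvp hv rest]
      · -- open state
        intro p acc cont j hc hside
        by_cases hvp : v = p
        · subst hvp
          by_cases hv : v = 'I'
          · subst hv
            have hstep : stepAp n 'I' i (acc, cont, j, true) 'I' =
                ((if cont > 2 then acc ++ [(j, even2odd cont)] else acc), 1, i, true) := by
              by_cases hc2 : cont > 2 <;> simp [stepAp, hc2]
            rw [recAcore_cons, hstep]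
            rw [IHo 'I' _ 1 i (by norm_num) (Or.inl (by norm_num))]
            have hB : Bopen j cont i 'I' ('I' :: rest) =
                (if cont > 2 then [(j, even2odd cont)] else []) ++ procRuns i ('I' :: rest) := by
              simp [Bopen, splitRun]
            rw [hB, procRuns_cons_I]
            by_cases hc2 : cont > 2 <;> simp [hc2, List.append_assoc]
          · have hstep : stepAp n v i (acc, cont, j, true) v =
                ((if cont > 2 then acc ++ [(j, even2odd cont)] else acc), 0, j, false) := by
              by_cases hc2 : cont > 2 <;> simp [stepAp, hv, hc2]
            rw [recAcore_cons, hstep]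
            rw [IHc v _ 0 j hv]
            have hB : Bopen j cont i v (v :: rest) =
                (if cont > 2 then [(j, even2odd cont)] else []) ++ procRuns i (v :: rest) := by
              simp [Bopen, splitRun]
            rw [hB, procRuns_cons_nonI i v hv rest]
            by_cases hc2 : cont > 2 <;> simp [hc2, List.append_assoc]
        · -- v differs from the previous char: the run continues
          have hpv : p ≠ v := fun h => hvp h.symm
          cases rest with
          | nil =>
            have hni : n = i + 1 := by simp only [List.length_cons, List.length_nil] at hn; push_cast at hn; omega
            have hstep : stepAp n p i (acc, cont, j, true) v =
                (if cont + 1 > 2 then (acc ++ [(j, even2odd (cont + 1))], 0, j, true)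
                 else (acc, cont + 1, j, true)) := by
              by_cases hc2 : cont + 1 > 2 <;> simp [stepAp, hpv, hni, hc2]
            rw [recAcore_cons, hstep]
            have hB : Bopen j cont i p [v] =
                (if cont + 1 > 2 then [(j, even2odd (cont + 1))] else []) := by
              simp [Bopen, splitRun, hvp, procRuns]
            rw [hB]
            by_cases hc2 : cont + 1 > 2 <;> simp [recAcore_nil, hc2]
          | cons w rest' =>
            have hne : n ≠ i + 1 := by simp only [List.length_cons] at hn; push_cast at hn; omega
            have hstep : stepAp n p i (acc, cont, j, true) v = (acc, cont + 1, j, true) := by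
              simp [stepAp, hpv, hne]
            rw [recAcore_cons, hstep]
            rw [IHo v acc (cont + 1) j (by omega) (Or.inr (by simp))]
            rw [Bopen_step j cont i p v hvp (w :: rest')]

-- A's fold over the enumerated string equals B's run scan (strings of length ≥ 3)
lemma foldl_eq_procRuns (l : List Char) (h3 : ¬ l.length < 3) :
    ((PySem.List.enumerate l).foldl (stepA l) ([], 0, 0, false)).1 = procRuns 0 l := by
  cases l with
  | nil => simp at h3
  | cons c rest =>
    have hrest : rest ≠ [] := by intro h; subst h; simp at h3
    rw [PySem.List.enumerate_cons, List.foldl_cons]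
    have hb := bridge (c :: rest) rest [c] (stepA (c :: rest) ([], 0, 0, false) (0, c)) (by simp) (by simp)
    simp only [List.length_cons, List.length_nil, List.getLast_singleton] at hb
    norm_num at hb
    rw [show (0 : Int) + 1 = 1 from rfl, hb]
    obtain ⟨IHc, IHo⟩ := main_inv rest.length rest le_rfl ((rest.length : Int) + 1) 1
      (by ring)
    by_cases hc : c = 'I'
    · subst hc
      have hfirst : stepA ('I' :: rest) ([], 0, 0, false) (0, 'I') = ([], 1, 0, true) := by
        simp [stepA]
      rw [hfirst, IHo 'I' [] 1 0 (by norm_num) (Or.inr hrest)]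
      rw [procRuns_cons_I 0 rest]
      norm_num
    · have hfirst : stepA (c :: rest) ([], 0, 0, false) (0, c) = ([], 0, 0, false) := by
        simp [stepA, hc]
      rw [hfirst, IHc c [] 0 0 hc]
      rw [procRuns_cons_nonI 0 c hc rest]
      norm_num

-- ===== VERDICT (by name: the statement is the Claim_ definition above) =====
theorem make_group_result_spec : Claim_equal_make_group_result := by
  intro in_str _
  show make_group_result in_str = make_group_result_alt in_str
  by_cases h3 : in_str.toList.length < 3
  · simp only [make_group_result, make_group_result_alt, if_pos h3]
  · simp only [make_group_result, make_group_result_alt, if_neg h3]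
    exact foldl_eq_procRuns in_str.toList h3
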